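-- pv_equiv track=rewrite | github.com/OttoBoop/IA_Educacao_V2 | backend/tests/ui/investor_journey_agent/test_flow_cards.py | _extract_css_block
-- ===== SOURCE A (Python) =====
-- def _extract_css_block(html: str, selector: str) -> str:
--     """Extract a CSS rule block for a given selector from inline <style> tags.
--
--     Returns the full rule text including the selector and braces.
--     Handles selectors that may appear multiple times; returns all matches concatenated.
--     """
--     import re
--
--     results = []
--     # Find all occurrences of the selector
--     idx = 0
--     while True:
--         pos = html.find(selector, idx)
--         if pos == -1:
--             break
--         # Find the opening brace
--         brace_start = html.find("{", pos)
--         if brace_start == -1: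
--             break
--         # Find matching closing brace (handle nesting)
--         depth = 0
--         brace_end = brace_start
--         for i in range(brace_start, len(html)):
--             if html[i] == "{":
--                 depth += 1
--             elif html[i] == "}":
--                 depth -= 1
--                 if depth == 0:
--                     brace_end = i
--                     break
--         results.append(html[pos : brace_end + 1])
--         idx = brace_end + 1
--     return "\n".join(results)
-- ===== SOURCE B (Python) =====
-- def _extract_css_block(html: str, selector: str) -> str:
--     """Same result as A, by staged passes: one stack pass precomputes the
--     matching '}' for every '{'; comprehensions precompute all brace positions
--     and all selector occurrence positions; a final pass walks the occurrence
--     list with a skip threshold instead of repeated str.find scans."""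
--     n = len(html)
--     pairs = {}
--     stack = []
--     for i, ch in enumerate(html):
--         if ch == "{":
--             stack.append(i)
--         elif ch == "}" and stack:
--             pairs[stack.pop()] = i
--     braces = [i for i in range(n) if html[i] == "{"]
--     occs = [i for i in range(n + 1) if html.startswith(selector, i)]
--     out = []
--     idx = 0
--     for p in occs:
--         if p < idx:
--             continue
--         b = next((q for q in braces if q >= p), -1)
--         if b == -1:
--             break
--         e = pairs.get(b, b)
--         out.append(html[p:e + 1])
--         idx = e + 1
--     return "\n".join(out)
-- ===== Notes on version B (the rewrite author's own statement) =====
-- stated objective: alternative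
-- what changed: A interleaves str.find calls and a per-match depth-counting brace scan inside one while loop; B is staged: a single stack pass precomputes every '{'-to-matching-'}' pair, comprehensions precompute all brace positions and all selector occurrence positions, and a final pass walks the occurrence list with a skip threshold, obtaining each block end by dictionary lookup.
import Mathlib
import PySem

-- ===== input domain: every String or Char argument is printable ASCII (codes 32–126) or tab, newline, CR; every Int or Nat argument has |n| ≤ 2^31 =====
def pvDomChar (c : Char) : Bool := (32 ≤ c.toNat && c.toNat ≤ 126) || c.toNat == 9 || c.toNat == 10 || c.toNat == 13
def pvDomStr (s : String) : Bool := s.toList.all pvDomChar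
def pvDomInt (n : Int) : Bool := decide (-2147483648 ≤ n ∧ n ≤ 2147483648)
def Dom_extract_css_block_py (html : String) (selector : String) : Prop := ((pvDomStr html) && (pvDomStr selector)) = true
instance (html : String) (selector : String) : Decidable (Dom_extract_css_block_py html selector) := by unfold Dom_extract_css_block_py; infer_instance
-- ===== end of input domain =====

-- B replaces A's interleaved find/depth-scan while-loop by staged passes: one stack
-- pass precomputing every '{'→matching-'}' pair, precomputed brace-position and
-- selector-occurrence lists, and a final walk of the occurrence list with a skip
-- threshold that finds each block end by map lookup.

-- ===== PORT A =====
-- A's inner for-loop over range(brace_start, len(html)): depth counter d, brace_end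
-- initialised to brace_start (the 'be' argument); returns the final brace_end.
def pvAScan : List Char → Int → Nat → Nat → Nat
  | [], _, _, be => be
  | c :: cs, d, i, be =>
    if c = '{' then pvAScan cs (d + 1) (i + 1) be
    else if c = '}' then
      (if d - 1 = 0 then i else pvAScan cs (d - 1) (i + 1) be)
    else pvAScan cs d (i + 1) be

-- A's while-loop; fuel = |html|+1 bounds the iteration count (idx strictly increases).
def pvALoop (cs sel : List Char) (idx : Nat) : Nat → List (List Char)
  | 0 => []
  | fuel + 1 =>
    let p := PySem.Chars.findFrom cs sel (idx : Int) none
    if p = -1 then []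
    else
      let pos := p.toNat
      let b := PySem.Chars.findFrom cs ['{'] (pos : Int) none
      if b = -1 then []
      else
        let bs := b.toNat
        let brace_end := pvAScan (cs.drop bs) 0 bs bs
        PySem.List.slice cs (some (pos : Int)) (some ((brace_end + 1 : Nat) : Int)) ::
          pvALoop cs sel (brace_end + 1) fuel

def extract_css_block_py (html : String) (selector : String) : String :=
  String.ofList (PySem.Chars.join ['\n'] (pvALoop html.toList selector.toList 0 (html.toList.length + 1)))

-- ===== PORT B =====
-- B's single stack pass: push index on '{'; on '}' with a non-empty stack pop and record the pair.
def pvPass : List Char → Nat → List Nat × PySem.Dict Nat Nat → List Nat × PySem.Dict Nat Nat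
  | [], _, sm => sm
  | c :: cs, i, (st, m) =>
    if c = '{' then pvPass cs (i + 1) (i :: st, m)
    else if c = '}' then
      match st with
      | [] => pvPass cs (i + 1) ([], m)
      | t :: rest => pvPass cs (i + 1) (rest, m.insert t i)
    else pvPass cs (i + 1) (st, m)

-- braces = [i for i in range(n) if html[i] == "{"]
def pvBraces (cs : List Char) : List Nat :=
  (List.range cs.length).filter (fun i => cs.getD i ' ' == '{')

-- occs = [i for i in range(n + 1) if html.startswith(selector, i)]
def pvOccs (cs sel : List Char) : List Nat :=
  (List.range (cs.length + 1)).filter (fun i => PySem.Chars.startswith (cs.drop i) sel)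

-- B's final pass over the occurrence list: skip below the threshold idx,
-- otherwise take the first brace ≥ p, look up its match (default b) and recurse.
def pvBWalk (cs : List Char) (m : PySem.Dict Nat Nat) (braces : List Nat) :
    List Nat → Nat → List (List Char)
  | [], _ => []
  | p :: ps, idx =>
    if p < idx then pvBWalk cs m braces ps idx
    else
      match braces.find? (fun q => decide (p ≤ q)) with
      | none => []
      | some b =>
        let e := m.getD b b
        PySem.List.slice cs (some (p : Int)) (some ((e + 1 : Nat) : Int)) ::
          pvBWalk cs m braces ps (e + 1)

def extract_css_block_py_alt (html : String) (selector : String) : String :=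
  let cs := html.toList
  String.ofList (PySem.Chars.join ['\n']
    (pvBWalk cs (pvPass cs 0 ([], PySem.Dict.empty)).2 (pvBraces cs) (pvOccs cs selector.toList) 0))

-- ===== PRECONDITION & SPEC =====
def Spec_extract_css_block_py (html : String) (selector : String) (out : String) : Prop := out = extract_css_block_py_alt html selector
instance (html : String) (selector : String) (out : String) : Decidable (Spec_extract_css_block_py html selector out) := by unfold Spec_extract_css_block_py; infer_instance

-- ===== CLAIM (what is proved, stated in full; the proofs are below) =====
def Claim_equal_extract_css_block_py : Prop := ∀ (html : String) (selector : String), Dom_extract_css_block_py html selector → Spec_extract_css_block_py html selector (extract_css_block_py html selector)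

-- ===== LEMMAS AND PROOFS =====

-- Reference scan: first index (relative) at which the brace depth, starting at k ≥ 1, hits 0.
def pvScan : List Char → Nat → Option Nat
  | [], _ => none
  | c :: cs, k =>
    if c = '{' then (pvScan cs (k + 1)).map (· + 1)
    else if c = '}' then
      (if k = 1 then some 0 else (pvScan cs (k - 1)).map (· + 1))
    else (pvScan cs k).map (· + 1)

theorem pvAScan_eq_pvScan : ∀ (cs : List Char) (k : Nat) (i be : Nat), 1 ≤ k →
    pvAScan cs (k : Int) i be = (pvScan cs k).elim be (fun r => i + r) := by
  intro cs
  induction cs with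
  | nil => intro k i be hk; simp [pvAScan, pvScan]
  | cons c cs ih =>
    intro k i be hk
    by_cases hob : c = '{'
    · have h1 : (k : Int) + 1 = ((k + 1 : Nat) : Int) := by push_cast; ring
      simp only [pvAScan, pvScan, hob, h1, if_pos]
      rw [ih (k + 1) (i + 1) be (by omega)]
      cases pvScan cs (k + 1) <;> simp <;> omega
    · by_cases hcb : c = '}'
      · by_cases hk1 : k = 1
        · subst hk1
          simp [pvAScan, pvScan, hcb]
        · have h1 : (k : Int) - 1 = ((k - 1 : Nat) : Int) := by push_cast [Nat.cast_sub hk]; ring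
          have h3 : ¬ (k - 1 = 0) := by omega
          simp only [pvAScan, pvScan, hcb, h1, Nat.cast_eq_zero, if_neg h3, if_neg hk1]
          rw [ih (k - 1) (i + 1) be (by omega)]
          cases pvScan cs (k - 1) <;> simp <;> omega
      · simp only [pvAScan, pvScan, if_neg hob, if_neg hcb]
        rw [ih k (i + 1) be hk]
        cases pvScan cs k <;> simp <;> omega

theorem pvScan_lt_length : ∀ (cs : List Char) (k r : Nat), pvScan cs k = some r → r < cs.length := by
  intro cs
  induction cs with
  | nil => intro k r h; simp [pvScan] at h
  | cons c cs ih =>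
    intro k r h
    simp only [pvScan] at h
    split_ifs at h with h1 h2 h3
    · cases hs : pvScan cs (k + 1) with
      | none => rw [hs] at h; simp at h
      | some r' => rw [hs] at h; simp at h; have := ih _ _ hs; simp; omega
    · simp at h; simp [← h]
    · cases hs : pvScan cs (k - 1) with
      | none => rw [hs] at h; simp at h
      | some r' => rw [hs] at h; simp at h; have := ih _ _ hs; simp; omega
    · cases hs : pvScan cs k with
      | none => rw [hs] at h; simp at h
      | some r' => rw [hs] at h; simp at h; have := ih _ _ hs; simp; omega

theorem pvNotMemCons {t i : Nat} {pre : List Nat} (h1 : t ≠ i) (h2 : t ∉ pre) : t ∉ i :: pre := by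
  intro hc
  rcases List.mem_cons.mp hc with rfl | hc
  · exact h1 rfl
  · exact h2 hc

theorem pvPass_append : ∀ (xs ys : List Char) (i : Nat) (sm : List Nat × PySem.Dict Nat Nat),
    pvPass (xs ++ ys) i sm = pvPass ys (i + xs.length) (pvPass xs i sm) := by
  intro xs
  induction xs with
  | nil => intro ys i sm; simp [pvPass]
  | cons c cs ih =>
    intro ys i sm
    obtain ⟨st, m⟩ := sm
    have hi : i + 1 + cs.length = i + (cs.length + 1) := by omega
    cases st with
    | nil =>
      simp only [List.cons_append, pvPass, List.length_cons]
      split_ifs with h1 h2 <;> rw [ih, hi]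
    | cons t rest =>
      simp only [List.cons_append, pvPass, List.length_cons]
      split_ifs with h1 h2 <;> rw [ih, hi]

-- Stack elements stay below the running index.
theorem pvPass_stack_lt : ∀ (cs : List Char) (i : Nat) (st : List Nat) (m : PySem.Dict Nat Nat),
    (∀ x ∈ st, x < i) → ∀ x ∈ (pvPass cs i (st, m)).1, x < i + cs.length := by
  intro cs
  induction cs with
  | nil => intro i st m hst x hx; simpa [pvPass] using hst x hx
  | cons c cs ih =>
    intro i st m hst x hx
    simp only [pvPass] at hx
    split_ifs at hx with h1 h2
    · have := ih (i + 1) (i :: st) m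
        (by intro y hy
            rcases List.mem_cons.mp hy with rfl | hy
            · omega
            · exact lt_trans (hst y hy) (by omega)) x hx
      simp only [List.length_cons]; omega
    · cases st with
      | nil =>
        have := ih (i + 1) [] m (by intro y hy; simp at hy) x hx
        simp only [List.length_cons]; omega
      | cons t rest =>
        have := ih (i + 1) rest (m.insert t i)
          (by intro y hy; exact lt_trans (hst y (by simp [hy])) (by omega)) x hx
        simp only [List.length_cons]; omega
    · have := ih (i + 1) st m (by intro y hy; exact lt_trans (hst y hy) (by omega)) x hx
      simp only [List.length_cons]; omega

-- After t has been popped, later steps never touch key t.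
theorem pvPass_get?_frozen : ∀ (cs : List Char) (i : Nat) (st : List Nat) (m : PySem.Dict Nat Nat)
    (t : Nat), t ∉ st → t < i → ((pvPass cs i (st, m)).2).get? t = m.get? t := by
  intro cs
  induction cs with
  | nil => intro i st m t _ _; simp [pvPass]
  | cons c cs ih =>
    intro i st m t hst hti
    simp only [pvPass]
    split_ifs with h1 h2
    · rw [ih (i + 1) (i :: st) m t (pvNotMemCons (Nat.ne_of_lt hti) hst) (by omega)]
    · cases st with
      | nil => rw [ih (i + 1) [] m t (by simp) (by omega)]
      | cons h rest =>
        rw [ih (i + 1) rest (m.insert h i) t (by intro hc; exact hst (by simp [hc])) (by omega)]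
        exact PySem.Dict.get?_insert_of_ne _ _ (by intro hc; exact hst (by simp [hc]))
    · exact ih (i + 1) st m t hst (by omega)

-- The stack element at depth pre.length + 1 is recorded exactly at the first position
-- where the depth counter starting there reaches 0.
theorem pvPass_get?_match : ∀ (cs : List Char) (i : Nat) (pre : List Nat) (t : Nat)
    (rest : List Nat) (m : PySem.Dict Nat Nat), t ∉ pre → t ∉ rest → t < i →
    ((pvPass cs i (pre ++ t :: rest, m)).2).get? t =
      (pvScan cs (pre.length + 1)).elim (m.get? t) (fun r => some (i + r)) := by
  intro cs
  induction cs with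
  | nil => intro i pre t rest m _ _ _; simp [pvPass, pvScan]
  | cons c cs ih =>
    intro i pre t rest m hpre hrest hti
    by_cases h1 : c = '{'
    · have hstep : pvPass (c :: cs) i (pre ++ t :: rest, m) =
          pvPass cs (i + 1) ((i :: pre) ++ t :: rest, m) := by
        simp [pvPass, h1]
      rw [hstep, ih (i + 1) (i :: pre) t rest m (pvNotMemCons (Nat.ne_of_lt hti) hpre) hrest (by omega)]
      have hsc : pvScan (c :: cs) (pre.length + 1) = (pvScan cs (pre.length + 1 + 1)).map (· + 1) := by
        simp [pvScan, h1]
      rw [hsc]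
      simp only [List.length_cons]
      cases pvScan cs (pre.length + 1 + 1) <;> simp <;> omega
    · by_cases h2 : c = '}'
      · cases pre with
        | nil =>
          have hstep : pvPass (c :: cs) i ([] ++ t :: rest, m) =
              pvPass cs (i + 1) (rest, m.insert t i) := by
            simp [pvPass, h2]
          rw [hstep, pvPass_get?_frozen cs (i + 1) rest (m.insert t i) t hrest (by omega)]
          have hsc : pvScan (c :: cs) 1 = some 0 := by
            simp [pvScan, h2]
          simp only [List.length_nil, Nat.zero_add]
          rw [hsc]
          simp [PySem.Dict.get?_insert_self]
        | cons h pre' =>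
          have hth : t ≠ h := fun hc => hpre (by simp [hc])
          have hstep : pvPass (c :: cs) i ((h :: pre') ++ t :: rest, m) =
              pvPass cs (i + 1) (pre' ++ t :: rest, m.insert h i) := by
            simp [pvPass, h2]
          rw [hstep, ih (i + 1) pre' t rest (m.insert h i) (fun hc => hpre (by simp [hc])) hrest (by omega)]
          have hsc : pvScan (c :: cs) ((h :: pre').length + 1) =
              (pvScan cs (pre'.length + 1)).map (· + 1) := by
            simp only [pvScan, if_neg h1, if_pos h2, List.length_cons]
            rw [if_neg (by omega : ¬ (pre'.length + 1 + 1 = 1))]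
            congr 1
          rw [hsc, PySem.Dict.get?_insert_of_ne _ _ hth]
          cases pvScan cs (pre'.length + 1) <;> simp <;> omega
      · have hstep : pvPass (c :: cs) i (pre ++ t :: rest, m) =
            pvPass cs (i + 1) (pre ++ t :: rest, m) := by
          simp [pvPass, h1, h2]
        rw [hstep, ih (i + 1) pre t rest m hpre hrest (by omega)]
        have hsc : pvScan (c :: cs) (pre.length + 1) = (pvScan cs (pre.length + 1)).map (· + 1) := by
          simp [pvScan, h1, h2]
        rw [hsc]
        cases pvScan cs (pre.length + 1) <;> simp <;> omega

-- Keys at or above the final index are never inserted.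
theorem pvPass_get?_above : ∀ (cs : List Char) (i : Nat) (st : List Nat) (m : PySem.Dict Nat Nat)
    (t : Nat), (∀ x ∈ st, x < t) → i + cs.length ≤ t → ((pvPass cs i (st, m)).2).get? t = m.get? t := by
  intro cs
  induction cs with
  | nil => intro i st m t _ _; simp [pvPass]
  | cons c cs ih =>
    intro i st m t hst hit
    simp only [List.length_cons] at hit
    simp only [pvPass]
    split_ifs with h1 h2
    · rw [ih (i + 1) (i :: st) m t
        (by intro y hy
            rcases List.mem_cons.mp hy with rfl | hy
            · omega
            · exact hst y hy) (by omega)]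
    · cases st with
      | nil => rw [ih (i + 1) [] m t (by intro y hy; simp at hy) (by omega)]
      | cons h rest =>
        rw [ih (i + 1) rest (m.insert h i) t (by intro y hy; exact hst y (by simp [hy])) (by omega)]
        exact PySem.Dict.get?_insert_of_ne _ _ (by have := hst h (by simp); omega)
    · exact ih (i + 1) st m t hst (by omega)

-- Main bridge: where cs[bs] = '{', A's depth scan equals B's map lookup (default bs).
theorem pvBraceEnd_eq (cs : List Char) (bs : Nat) (hbs : bs < cs.length)
    (hob : cs.drop bs = '{' :: cs.drop (bs + 1)) :
    pvAScan (cs.drop bs) 0 bs bs = ((pvPass cs 0 ([], PySem.Dict.empty)).2).getD bs bs := by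
  have hA : pvAScan (cs.drop bs) 0 bs bs =
      (pvScan (cs.drop (bs + 1)) 1).elim bs (fun r => bs + 1 + r) := by
    rw [hob]
    show pvAScan ('{' :: cs.drop (bs + 1)) ((0 : Nat) : Int) bs bs = _
    simp only [pvAScan, if_true]
    have h01 : ((0 : Nat) : Int) + 1 = ((1 : Nat) : Int) := by norm_num
    rw [h01, pvAScan_eq_pvScan (cs.drop (bs + 1)) 1 (bs + 1) bs (le_refl 1)]
  have hsplit : cs = cs.take bs ++ '{' :: cs.drop (bs + 1) := by
    conv_lhs => rw [← List.take_append_drop bs cs]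
    rw [hob]
  have hlen : (cs.take bs).length = bs := by simp; omega
  have hstack : ∀ x ∈ (pvPass (cs.take bs) 0 ([], PySem.Dict.empty)).1, x < bs := by
    intro x hx
    have := pvPass_stack_lt (cs.take bs) 0 [] PySem.Dict.empty (by intro y hy; simp at hy) x hx
    omega
  have hB : ((pvPass cs 0 ([], PySem.Dict.empty)).2).get? bs =
      (pvScan (cs.drop (bs + 1)) 1).elim none (fun r => some (bs + 1 + r)) := by
    conv_lhs => rw [hsplit]
    rw [pvPass_append, hlen]
    have hsm : pvPass (cs.take bs) 0 ([], PySem.Dict.empty) =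
        ((pvPass (cs.take bs) 0 ([], PySem.Dict.empty)).1,
         (pvPass (cs.take bs) 0 ([], PySem.Dict.empty)).2) := rfl
    rw [hsm]
    show ((pvPass ('{' :: cs.drop (bs + 1)) (0 + bs) (_, _)).2).get? bs = _
    simp only [pvPass, Nat.zero_add, if_true]
    rw [show bs :: (pvPass (cs.take bs) 0 ([], PySem.Dict.empty)).1 =
          [] ++ bs :: (pvPass (cs.take bs) 0 ([], PySem.Dict.empty)).1 from rfl]
    rw [pvPass_get?_match (cs.drop (bs + 1)) (bs + 1) [] bs _ _
          (by simp) (by intro hc; exact absurd (hstack bs hc) (by omega)) (by omega)]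
    simp only [List.length_nil]
    rw [pvPass_get?_above (cs.take bs) 0 [] PySem.Dict.empty bs (by intro y hy; simp at hy) (by omega)]
    cases pvScan (cs.drop (bs + 1)) 1 <;> simp
  rw [hA, PySem.Dict.getD_eq_get?_getD, hB]
  cases pvScan (cs.drop (bs + 1)) 1 <;> simp

-- First element ≥ p of a filtered range: none-characterisation.
theorem pvFind?_range_none (m p : Nat) (P : Nat → Bool) :
    ((List.range m).filter P).find? (fun x => decide (p ≤ x)) = none ↔
      ∀ q, q < m → p ≤ q → P q = false := by
  induction m with
  | zero => simp
  | succ m ih =>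
    rw [List.range_succ, List.filter_append, List.find?_append]
    constructor
    · intro h q hq hpq
      rw [Option.or_eq_none_iff] at h
      rcases Nat.lt_succ_iff_lt_or_eq.mp hq with hq' | rfl
      · exact ih.mp h.1 q hq' hpq
      · by_contra hP
        have hPq : P q = true := by revert hP; cases P q <;> simp
        have := h.2
        simp [hPq, hpq] at this
    · intro h
      rw [Option.or_eq_none_iff]
      refine ⟨ih.mpr (fun q hq hpq => h q (by omega) hpq), ?_⟩
      by_cases hP : P m = true
      · rw [List.filter_cons, if_pos hP, List.filter_nil]
        have hnp : ¬ p ≤ m := fun hc => absurd (h m (by omega) hc) (by simp [hP])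
        simp [List.find?, hnp]
      · simp only [List.filter_cons]
        rw [if_neg (by simpa using hP)]
        simp

-- First element ≥ p of a filtered range: some-characterisation.
theorem pvFind?_range_some (m p : Nat) (P : Nat → Bool) : ∀ q : Nat,
    (((List.range m).filter P).find? (fun x => decide (p ≤ x)) = some q ↔
      (q < m ∧ P q = true ∧ p ≤ q ∧ ∀ j, p ≤ j → j < q → P j = false)) := by
  induction m with
  | zero => intro q; simp
  | succ m ih =>
    intro q
    rw [List.range_succ, List.filter_append, List.find?_append]
    cases hfirst : ((List.range m).filter P).find? (fun x => decide (p ≤ x)) with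
    | some r =>
      simp only [Option.some_or]
      obtain ⟨hr, hPr, hpr, hmin⟩ := (ih r).mp hfirst
      constructor
      · rintro h; injection h with h; subst h
        exact ⟨by omega, hPr, hpr, hmin⟩
      · rintro ⟨hq, hPq, hpq, hminq⟩
        congr
        rcases Nat.lt_trichotomy r q with hlt | heq | hgt
        · exact absurd (hminq r hpr hlt) (by simp [hPr])
        · exact heq
        · exact absurd (hmin q hpq hgt) (by simp [hPq])
    | none =>
      simp only [Option.none_or]
      have hnone := (pvFind?_range_none m p P).mp hfirst
      constructor
      · intro h
        have hq : q = m ∧ P m = true ∧ p ≤ m := by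
          by_cases hP : P m = true
          · rw [List.filter_cons, if_pos hP, List.filter_nil] at h
            simp only [List.find?] at h
            by_cases hpm : p ≤ m
            · simp [hpm] at h; exact ⟨h.symm, hP, hpm⟩
            · simp [hpm] at h
          · simp only [List.filter_cons] at h
            rw [if_neg (by simpa using hP)] at h
            simp at h
        obtain ⟨rfl, hPq, hpq⟩ := hq
        exact ⟨by omega, hPq, hpq, fun j hpj hjq => hnone j hjq hpj⟩
      · rintro ⟨hq, hPq, hpq, _⟩
        have hqm : q = m := by
          rcases Nat.lt_succ_iff_lt_or_eq.mp hq with h' | h'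
          · exact absurd (hnone q h' hpq) (by simp [hPq])
          · exact h'
        subst hqm
        rw [List.filter_cons, if_pos hPq, List.filter_nil]
        simp [List.find?, hpq]

-- '{' is a prefix of the suffix at q iff q is in range and cs[q] = '{'.
theorem pvBracePrefix (cs : List Char) (q : Nat) :
    ['{'] <+: cs.drop q ↔ q < cs.length ∧ cs.getD q ' ' = '{' := by
  constructor
  · rintro ⟨t, ht⟩
    have hq : q < cs.length := by
      by_contra hc
      rw [List.drop_eq_nil_of_le (by omega)] at ht
      exact absurd ht (by simp)
    refine ⟨hq, ?_⟩
    rw [List.drop_eq_getElem_cons hq] at ht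
    simp only [List.singleton_append, List.cons.injEq] at ht
    rw [List.getD_eq_getElem _ _ hq, ← ht.1]
  · rintro ⟨hq, hc⟩
    rw [List.getD_eq_getElem _ _ hq] at hc
    refine ⟨cs.drop (q + 1), ?_⟩
    rw [List.drop_eq_getElem_cons hq, hc]
    rfl

-- B's brace search over the precomputed list agrees with A's str.find for '{'.
theorem pvBraceFind_eq (cs : List Char) (p : Nat) (hp : p ≤ cs.length) :
    (pvBraces cs).find? (fun q => decide (p ≤ q)) =
      (if PySem.Chars.findFrom cs ['{'] (p : Int) none = -1 then none
       else some (PySem.Chars.findFrom cs ['{'] (p : Int) none).toNat) := by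
  by_cases hb : PySem.Chars.findFrom cs ['{'] (p : Int) none = -1
  · rw [if_pos hb]
    rw [PySem.Chars.findFrom_natCast_eq_neg_one_iff cs ['{'] p hp] at hb
    unfold pvBraces
    rw [pvFind?_range_none]
    intro q hq hpq
    by_contra hP
    have hPq : cs.getD q ' ' = '{' := by
      have : (cs.getD q ' ' == '{') = true := by revert hP; cases (cs.getD q ' ' == '{') <;> simp
      exact beq_iff_eq.mp this
    apply hb
    have hpref : ['{'] <+: cs.drop q := (pvBracePrefix cs q).mpr ⟨hq, hPq⟩
    have : cs.drop q = (cs.drop p).drop (q - p) := by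
      rw [List.drop_drop]; congr 1; omega
    rw [this] at hpref
    exact hpref.isInfix.trans (List.drop_suffix _ _).isInfix
  · rw [if_neg hb]
    obtain ⟨hge, hpref, hmin⟩ := PySem.Chars.findFrom_natCast_spec cs ['{'] p hp hb
    set bs := (PySem.Chars.findFrom cs ['{'] (p : Int) none).toNat with hbs
    obtain ⟨hbslt, hbsc⟩ := (pvBracePrefix cs bs).mp hpref
    unfold pvBraces
    rw [pvFind?_range_some]
    refine ⟨hbslt, by simp only [beq_iff_eq]; exact hbsc, by omega, ?_⟩
    intro j hpj hjq
    by_contra hP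
    have hPj : cs.getD j ' ' = '{' := by
      have : (cs.getD j ' ' == '{') = true := by revert hP; cases (cs.getD j ' ' == '{') <;> simp
      exact beq_iff_eq.mp this
    have hjlt : j < cs.length := by omega
    exact hmin j (by omega) hjq ((pvBracePrefix cs j).mpr ⟨hjlt, hPj⟩)

-- B's occurrence search agrees with A's str.find for the selector.
theorem pvOccFind_eq (cs sel : List Char) (idx : Nat) (hidx : idx ≤ cs.length) :
    (pvOccs cs sel).find? (fun q => decide (idx ≤ q)) =
      (if PySem.Chars.findFrom cs sel (idx : Int) none = -1 then none
       else some (PySem.Chars.findFrom cs sel (idx : Int) none).toNat) := by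
  have hPiff : ∀ q, (PySem.Chars.startswith (cs.drop q) sel = true) ↔ sel <+: cs.drop q := by
    intro q; simp [pysem]
  by_cases hb : PySem.Chars.findFrom cs sel (idx : Int) none = -1
  · rw [if_pos hb]
    rw [PySem.Chars.findFrom_natCast_eq_neg_one_iff cs sel idx hidx] at hb
    unfold pvOccs
    rw [pvFind?_range_none]
    intro q hq hpq
    by_contra hP
    have hpref : sel <+: cs.drop q := (hPiff q).mp (by revert hP; cases PySem.Chars.startswith (cs.drop q) sel <;> simp)
    apply hb
    have : cs.drop q = (cs.drop idx).drop (q - idx) := by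
      rw [List.drop_drop]; congr 1; omega
    rw [this] at hpref
    exact hpref.isInfix.trans (List.drop_suffix _ _).isInfix
  · rw [if_neg hb]
    obtain ⟨hge, hpref, hmin⟩ := PySem.Chars.findFrom_natCast_spec cs sel idx hidx hb
    set pos := (PySem.Chars.findFrom cs sel (idx : Int) none).toNat with hpos
    have hposle : pos ≤ cs.length := by
      have hchar := PySem.Chars.findFrom_natCast cs sel idx hidx
      have hfle := PySem.Chars.find_le_length (cs.drop idx) sel
      have hfne : ¬ PySem.Chars.find (cs.drop idx) sel = -1 := by
        intro h; exact hb (by rw [hchar, if_pos h])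
      rw [hchar, if_neg hfne] at hpos
      simp only [List.length_drop] at hfle
      omega
    unfold pvOccs
    rw [pvFind?_range_some]
    refine ⟨by omega, (hPiff pos).mpr hpref, by omega, ?_⟩
    intro j hpj hjq
    by_contra hP
    have : sel <+: cs.drop j := (hPiff j).mp (by revert hP; cases PySem.Chars.startswith (cs.drop j) sel <;> simp)
    exact hmin j (by omega) hjq this

-- Skipping: elements below the threshold contribute nothing.
theorem pvBWalk_skip (cs : List Char) (m : PySem.Dict Nat Nat) (braces : List Nat) :
    ∀ (pre ps : List Nat) (idx : Nat), (∀ x ∈ pre, x < idx) →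
      pvBWalk cs m braces (pre ++ ps) idx = pvBWalk cs m braces ps idx := by
  intro pre
  induction pre with
  | nil => intro ps idx _; simp
  | cons a rest ih =>
    intro ps idx hlt
    have ha : a < idx := hlt a (by simp)
    show pvBWalk cs m braces (a :: (rest ++ ps)) idx = _
    simp only [pvBWalk, if_pos ha]
    exact ih ps idx (fun x hx => hlt x (by simp [hx]))

-- find? = some gives a decomposition of the list with all earlier elements failing.
theorem pvFind?_decomp {l : List Nat} {f : Nat → Bool} {a : Nat} (h : l.find? f = some a) :
    ∃ pre post, l = pre ++ a :: post ∧ ∀ x ∈ pre, f x = false := by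
  induction l with
  | nil => simp at h
  | cons b bs ih =>
    by_cases hfb : f b = true
    · rw [List.find?_cons_of_pos hfb] at h
      injection h with h; subst h
      exact ⟨[], bs, rfl, by simp⟩
    · have hfb' : f b = false := by revert hfb; cases f b <;> simp
      rw [List.find?_cons_of_neg (by simp [hfb'])] at h
      obtain ⟨pre, post, hdec, hall⟩ := ih h
      refine ⟨b :: pre, post, by rw [hdec]; rfl, ?_⟩
      intro x hx
      rcases List.mem_cons.mp hx with rfl | hx
      · exact hfb'
      · exact hall x hx

-- The outer loops agree, by induction on A's fuel.
theorem pvLoop_eq (cs sel : List Char) : ∀ (fuel idx : Nat), idx ≤ cs.length →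
    cs.length + 1 ≤ fuel + idx →
    pvALoop cs sel idx fuel =
      pvBWalk cs (pvPass cs 0 ([], PySem.Dict.empty)).2 (pvBraces cs) (pvOccs cs sel) idx := by
  intro fuel
  induction fuel with
  | zero => intro idx hidx hfuel; exact absurd hidx (by omega)
  | succ fuel ih =>
    intro idx hidx hfuel
    simp only [pvALoop]
    by_cases hp : PySem.Chars.findFrom cs sel (idx : Int) none = -1
    · rw [if_pos hp]
      have hocc := pvOccFind_eq cs sel idx hidx
      rw [if_pos hp] at hocc
      have hnone := (pvFind?_range_none _ _ _).mp (by unfold pvOccs at hocc; exact hocc)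
      have hall : ∀ x ∈ pvOccs cs sel, x < idx := by
        intro x hx
        unfold pvOccs at hx
        rw [List.mem_filter, List.mem_range] at hx
        by_contra hc
        exact absurd (hnone x (by omega) (by omega)) (by simp [hx.2])
      rw [show pvOccs cs sel = pvOccs cs sel ++ [] by simp,
          pvBWalk_skip cs _ _ _ [] idx hall]
      rfl
    · rw [if_neg hp]
      have hocc := pvOccFind_eq cs sel idx hidx
      rw [if_neg hp] at hocc
      set pos := (PySem.Chars.findFrom cs sel (idx : Int) none).toNat with hposdef
      obtain ⟨hge, -, -⟩ := PySem.Chars.findFrom_natCast_spec cs sel idx hidx hp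
      have hidxpos : idx ≤ pos := by omega
      have hposle : pos ≤ cs.length := by
        have hchar := PySem.Chars.findFrom_natCast cs sel idx hidx
        have hfle := PySem.Chars.find_le_length (cs.drop idx) sel
        have hfne : ¬ PySem.Chars.find (cs.drop idx) sel = -1 := by
          intro h; exact hp (by rw [hchar, if_pos h])
        rw [hchar, if_neg hfne] at hposdef
        simp only [List.length_drop] at hfle
        omega
      obtain ⟨pre, post, hdec, hpre⟩ := pvFind?_decomp hocc
      have hprelt : ∀ x ∈ pre, x < idx := by
        intro x hx
        have := hpre x hx
        by_contra hc
        simp [show idx ≤ x by omega] at this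
      rw [hdec, pvBWalk_skip cs _ _ pre (pos :: post) idx hprelt]
      show _ = pvBWalk cs _ _ (pos :: post) idx
      simp only [pvBWalk, if_neg (by omega : ¬ pos < idx)]
      have hbr := pvBraceFind_eq cs pos hposle
      by_cases hb : PySem.Chars.findFrom cs ['{'] ((pos : Nat) : Int) none = -1
      · rw [if_pos hb]
        rw [if_pos hb] at hbr
        rw [hbr]
      · rw [if_neg hb]
        rw [if_neg hb] at hbr
        rw [hbr]
        dsimp only
        set bs := (PySem.Chars.findFrom cs ['{'] ((pos : Nat) : Int) none).toNat with hbsdef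
        obtain ⟨hbge, hbpref, -⟩ := PySem.Chars.findFrom_natCast_spec cs ['{'] pos hposle hb
        obtain ⟨hbslt, hbsc⟩ := (pvBracePrefix cs bs).mp hbpref
        have hbsc' : cs[bs] = '{' := by
          rw [List.getD_eq_getElem _ _ hbslt] at hbsc; exact hbsc
        have hdrop' : cs.drop bs = '{' :: cs.drop (bs + 1) := by
          rw [List.drop_eq_getElem_cons hbslt, hbsc']
        have hbe := pvBraceEnd_eq cs bs hbslt hdrop'
        rw [← hbe]
        have hbound : pvAScan (cs.drop bs) 0 bs bs < cs.length := by
          rw [hdrop']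
          show pvAScan ('{' :: cs.drop (bs + 1)) ((0 : Nat) : Int) bs bs < _
          simp only [pvAScan, if_true]
          have h01 : ((0 : Nat) : Int) + 1 = ((1 : Nat) : Int) := by norm_num
          rw [h01, pvAScan_eq_pvScan (cs.drop (bs + 1)) 1 (bs + 1) bs (le_refl 1)]
          cases hs : pvScan (cs.drop (bs + 1)) 1 with
          | none => simpa using hbslt
          | some r' =>
            have := pvScan_lt_length _ _ _ hs
            simp only [List.length_drop] at this
            simp only [Option.elim]
            omega
        have hbsge : bs ≤ pvAScan (cs.drop bs) 0 bs bs := by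
          rw [hdrop']
          show bs ≤ pvAScan ('{' :: cs.drop (bs + 1)) ((0 : Nat) : Int) bs bs
          simp only [pvAScan, if_true]
          have h01 : ((0 : Nat) : Int) + 1 = ((1 : Nat) : Int) := by norm_num
          rw [h01, pvAScan_eq_pvScan (cs.drop (bs + 1)) 1 (bs + 1) bs (le_refl 1)]
          cases pvScan (cs.drop (bs + 1)) 1 <;> simp <;> omega
        set e := pvAScan (cs.drop bs) 0 bs bs with hedef
        congr 1
        rw [ih (e + 1) (by omega) (by omega), hdec]
        rw [show pre ++ pos :: post = (pre ++ [pos]) ++ post by simp]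
        rw [pvBWalk_skip cs _ _ (pre ++ [pos]) post (e + 1)]
        intro x hx
        rcases List.mem_append.mp hx with hx | hx
        · have := hprelt x hx; omega
        · simp at hx; omega

-- ===== VERDICT (by name: the statement is the Claim_ definition above) =====
theorem extract_css_block_py_spec : Claim_equal_extract_css_block_py := by
  intro html selector _
  unfold Spec_extract_css_block_py extract_css_block_py extract_css_block_py_alt
  rw [pvLoop_eq html.toList selector.toList (html.toList.length + 1) 0 (by omega) (by omega)]
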